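-- pv_equiv track=rewrite | github.com/erikstoklasa/PythonAlgorithms | 03-assignment/date.py | isPartOfAllowedWords
-- ===== SOURCE A (Python) =====
-- helpers = ["the", "of"]
--
-- months = [
--     "January",
--     "February",
--     "March",
--     "April",
--     "May",
--     "June",
--     "July",
--     "August",
--     "September",
--     "October",
--     "November",
--     "December",
-- ]
--
-- ordinals = [
--     ["first", 1],
--     ["second", 2],
--     ["third", 3],
--     ["fifth", 5],
--     ["eighth", 8],
--     ["ninth", 9],
--     ["twelfth", 12],
--     ["twentieth", 20],
--     ["thirtieth", 30],
-- ]
--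
-- numbers = [
--     ["one", 1],
--     ["two", 2],
--     ["three", 3],
--     ["four", 4],
--     ["five", 5],
--     ["six", 6],
--     ["seven", 7],
--     ["eight", 8],
--     ["nine", 9],
--     ["ten", 10],
--     ["eleven", 11],
--     ["twelve", 12],
--     ["thirteen", 13],
--     ["fourteen", 14],
--     ["fifteen", 15],
--     ["sixteen", 16],
--     ["seventeen", 17],
--     ["eighteen", 18],
--     ["nineteen", 19],
--     ["twenty", 20],
--     ["thirty", 30],
--     ["forty", 40],
--     ["fifty", 50],
--     ["sixty", 60],
--     ["seventy", 70],
--     ["eighty", 80],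
--     ["ninety", 90],
--     ["hundred", 100],
--     ["thousand", 1000],
-- ]
--
-- def isPartOfAllowedWords(s: str) -> bool:
--     if s in helpers:
--         return True
--     if s in months:
--         return True
--     found = False
--     for row in numbers:
--         if row[0] == s or (row[0] + "th") == s:
--             found = True
--         if found:
--             return True
--     found = False
--     for row in ordinals:
--         if row[0] == s:
--             found = True
--         if found:
--             return True
--     return False
-- ===== SOURCE B (Python) =====
-- helpers = ["the", "of"]
--
-- months = [
--     "January", "February", "March", "April", "May", "June",
--     "July", "August", "September", "October", "November", "December",
-- ]
--
-- ordinals = [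
--     ["first", 1], ["second", 2], ["third", 3], ["fifth", 5],
--     ["eighth", 8], ["ninth", 9], ["twelfth", 12], ["twentieth", 20],
--     ["thirtieth", 30],
-- ]
--
-- numbers = [
--     ["one", 1], ["two", 2], ["three", 3], ["four", 4], ["five", 5],
--     ["six", 6], ["seven", 7], ["eight", 8], ["nine", 9], ["ten", 10],
--     ["eleven", 11], ["twelve", 12], ["thirteen", 13], ["fourteen", 14],
--     ["fifteen", 15], ["sixteen", 16], ["seventeen", 17], ["eighteen", 18],
--     ["nineteen", 19], ["twenty", 20], ["thirty", 30], ["forty", 40],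
--     ["fifty", 50], ["sixty", 60], ["seventy", 70], ["eighty", 80],
--     ["ninety", 90], ["hundred", 100], ["thousand", 1000],
-- ]
--
-- # All allowed tokens, sorted once at module load: helper words, month names,
-- # number words plain and with "th" appended, and ordinal words.
-- ALLOWED_SORTED = sorted(
--     helpers
--     + months
--     + [row[0] for row in numbers]
--     + [row[0] + "th" for row in numbers]
--     + [row[0] for row in ordinals]
-- )
--
-- def isPartOfAllowedWords(s: str) -> bool:
--     # binary search (bisect_left) over the sorted token table
--     lo, hi = 0, len(ALLOWED_SORTED)
--     while lo < hi:
--         mid = (lo + hi) // 2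
--         if ALLOWED_SORTED[mid] < s:
--             lo = mid + 1
--         else:
--             hi = mid
--     return lo < len(ALLOWED_SORTED) and ALLOWED_SORTED[lo] == s
-- ===== Notes on version B (the rewrite author's own statement) =====
-- stated objective: alternative
-- what changed: Replaced A's sequential list-membership checks and two flag-carrying scanning loops (recomputing row[0]+'th' on every call) by a token table sorted once at module load and a bisect_left-style binary search per call.
import Mathlib
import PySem

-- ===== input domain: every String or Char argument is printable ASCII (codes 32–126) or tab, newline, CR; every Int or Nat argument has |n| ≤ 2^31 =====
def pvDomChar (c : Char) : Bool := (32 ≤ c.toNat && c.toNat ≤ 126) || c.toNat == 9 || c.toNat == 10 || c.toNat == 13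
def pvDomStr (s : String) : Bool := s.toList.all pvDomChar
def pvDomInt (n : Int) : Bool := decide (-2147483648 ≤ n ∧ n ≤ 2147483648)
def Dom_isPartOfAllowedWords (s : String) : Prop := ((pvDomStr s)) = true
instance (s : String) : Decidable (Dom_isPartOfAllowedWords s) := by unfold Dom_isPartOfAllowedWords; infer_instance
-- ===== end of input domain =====

-- B sorts all allowed tokens once and answers each query by a bisect_left-style
-- binary search, instead of A's sequential list checks and scanning loops.

-- ===== PORT A =====
def pvHelpers : List String := ["the", "of"]

def pvMonths : List String :=
  ["January", "February", "March", "April", "May", "June",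
   "July", "August", "September", "October", "November", "December"]

def pvOrdinals : List (String × Int) :=
  [("first", 1), ("second", 2), ("third", 3), ("fifth", 5), ("eighth", 8),
   ("ninth", 9), ("twelfth", 12), ("twentieth", 20), ("thirtieth", 30)]

def pvNumbers : List (String × Int) :=
  [("one", 1), ("two", 2), ("three", 3), ("four", 4), ("five", 5),
   ("six", 6), ("seven", 7), ("eight", 8), ("nine", 9), ("ten", 10),
   ("eleven", 11), ("twelve", 12), ("thirteen", 13), ("fourteen", 14),
   ("fifteen", 15), ("sixteen", 16), ("seventeen", 17), ("eighteen", 18),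
   ("nineteen", 19), ("twenty", 20), ("thirty", 30), ("forty", 40),
   ("fifty", 50), ("sixty", 60), ("seventy", 70), ("eighty", 80),
   ("ninety", 90), ("hundred", 100), ("thousand", 1000)]

-- the 'for row in ordinals' loop with its 'found' flag and early return
def pvOrdLoop (s : String) (found : Bool) : List (String × Int) → Bool
  | [] => false
  | row :: rest =>
      let found := if row.1 == s then true else found
      if found then true else pvOrdLoop s found rest

-- the 'for row in numbers' loop; falls through to the ordinals loop
def pvNumLoop (s : String) (found : Bool) : List (String × Int) → Bool
  | [] => pvOrdLoop s false pvOrdinals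
  | row :: rest =>
      let found := if row.1 == s || (row.1 ++ "th") == s then true else found
      if found then true else pvNumLoop s found rest

def isPartOfAllowedWords (s : String) : Bool :=
  if pvHelpers.contains s then true
  else if pvMonths.contains s then true
  else pvNumLoop s false pvNumbers

-- ===== PORT B =====
-- ALLOWED_SORTED = sorted(helpers + months + numbers words + numbers words + "th" + ordinal words)
def pvAllWords : List String :=
  pvHelpers ++ pvMonths ++ pvNumbers.map (·.1)
    ++ pvNumbers.map (fun r => r.1 ++ "th") ++ pvOrdinals.map (·.1)

def pvAllowedSorted : List String := PySem.List.sorted pvAllWords (fun x => x) false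

-- the 'while lo < hi' bisect_left loop of Source B (string '<' is code-point
-- lexicographic in both Python and Lean; getD is exact since mid < hi ≤ len)
def pvBisect (l : List String) (s : String) (lo hi : Nat) : Nat :=
  if _h : lo < hi then
    -- mid = (lo + hi) // 2, inlined
    if l.getD ((lo + hi) / 2) "" < s then pvBisect l s ((lo + hi) / 2 + 1) hi
    else pvBisect l s lo ((lo + hi) / 2)
  else lo
termination_by hi - lo
decreasing_by all_goals omega

def isPartOfAllowedWords_alt (s : String) : Bool :=
  let lo := pvBisect pvAllowedSorted s 0 pvAllowedSorted.length
  decide (lo < pvAllowedSorted.length) && (pvAllowedSorted.getD lo "" == s)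

-- ===== PRECONDITION & SPEC =====
def Spec_isPartOfAllowedWords (s : String) (out : Bool) : Prop := out = isPartOfAllowedWords_alt s
instance (s : String) (out : Bool) : Decidable (Spec_isPartOfAllowedWords s out) := by unfold Spec_isPartOfAllowedWords; infer_instance

-- ===== CLAIM (what is proved, stated in full; the proofs are below) =====
def Claim_equal_isPartOfAllowedWords : Prop := ∀ (s : String), Dom_isPartOfAllowedWords s → Spec_isPartOfAllowedWords s (isPartOfAllowedWords s)

-- ===== LEMMAS AND PROOFS =====
theorem ordLoop_eq (s : String) (rows : List (String × Int)) :
    pvOrdLoop s false rows = rows.any (fun r => r.1 == s) := by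
  induction rows with
  | nil => rfl
  | cons row rest ih =>
      simp only [pvOrdLoop]
      by_cases h : (row.1 == s) = true
      · simp [h]
      · simp only [Bool.not_eq_true] at h; simp [h, ih]

theorem numLoop_eq (s : String) (rows : List (String × Int)) :
    pvNumLoop s false rows =
      (rows.any (fun r => r.1 == s || (r.1 ++ "th") == s) || pvOrdLoop s false pvOrdinals) := by
  induction rows with
  | nil => simp [pvNumLoop]
  | cons row rest ih =>
      simp only [pvNumLoop]
      by_cases h : (row.1 == s || (row.1 ++ "th") == s) = true
      · simp [h]
      · simp only [Bool.not_eq_true] at h; simp [h, ih]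

theorem portA_eq (s : String) :
    isPartOfAllowedWords s =
      (pvHelpers.contains s || pvMonths.contains s
        || pvNumbers.any (fun r => r.1 == s || (r.1 ++ "th") == s)
        || pvOrdinals.any (fun r => r.1 == s)) := by
  rw [isPartOfAllowedWords, numLoop_eq, ordLoop_eq]
  by_cases h1 : pvHelpers.contains s = true <;>
    by_cases h2 : pvMonths.contains s = true <;>
      simp [Bool.or_assoc]

-- A returns true exactly on membership in the combined word list
theorem portA_mem (s : String) :
    isPartOfAllowedWords s = true ↔ s ∈ pvAllWords := by
  rw [portA_eq, pvAllWords]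
  simp only [List.mem_append, List.mem_map, List.any_eq_true, Bool.or_eq_true,
    decide_eq_true_eq, beq_iff_eq, List.contains_eq_mem]
  constructor
  · rintro (((h | h) | ⟨r, hr, (h | h)⟩) | ⟨r, hr, h⟩)
    · exact Or.inl (Or.inl (Or.inl (Or.inl h)))
    · exact Or.inl (Or.inl (Or.inl (Or.inr h)))
    · exact Or.inl (Or.inl (Or.inr ⟨r, hr, h⟩))
    · exact Or.inl (Or.inr ⟨r, hr, h⟩)
    · exact Or.inr ⟨r, hr, h⟩
  · rintro ((((h | h) | ⟨r, hr, h⟩) | ⟨r, hr, h⟩) | ⟨r, hr, h⟩)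
    · exact Or.inl (Or.inl (Or.inl h))
    · exact Or.inl (Or.inl (Or.inr h))
    · exact Or.inl (Or.inr ⟨r, hr, Or.inl h⟩)
    · exact Or.inl (Or.inr ⟨r, hr, Or.inr h⟩)
    · exact Or.inr ⟨r, hr, h⟩

-- bisect_left loop invariant: on a (≤)-sorted list the returned index splits l
-- into a prefix of elements < s and a suffix of elements ≥ s
theorem pvBisect_spec (l : List String) (hsort : l.Pairwise (fun a b => a ≤ b)) (s : String) :
    ∀ n lo hi, hi - lo = n → lo ≤ hi → hi ≤ l.length →
      (∀ i, i < lo → l.getD i "" < s) →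
      (∀ i, hi ≤ i → i < l.length → ¬ l.getD i "" < s) →
      (pvBisect l s lo hi ≤ l.length ∧
        (∀ i, i < pvBisect l s lo hi → l.getD i "" < s) ∧
        (∀ i, pvBisect l s lo hi ≤ i → i < l.length → ¬ l.getD i "" < s)) := by
  intro n
  induction n using Nat.strong_induction_on with
  | _ n ih =>
    intro lo hi hn hle hhi hpre hsuf
    rw [pvBisect]
    split_ifs with h hcmp
    · -- l[mid] < s : search right half
      refine ih (hi - ((lo + hi) / 2 + 1)) (by omega) _ _ rfl (by omega) hhi ?_ hsuf
      intro i hi'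
      rcases Nat.lt_or_ge i ((lo + hi) / 2) with h' | h'
      · have hmidlen : (lo + hi) / 2 < l.length := by omega
        have hilen : i < l.length := by omega
        have hle2 : l[i] ≤ l[(lo + hi) / 2] :=
          List.pairwise_iff_getElem.mp hsort i ((lo + hi) / 2) hilen hmidlen h'
        rw [List.getD_eq_getElem l "" hilen]
        calc l[i] ≤ l[(lo + hi) / 2] := hle2
          _ = l.getD ((lo + hi) / 2) "" := (List.getD_eq_getElem l "" hmidlen).symm
          _ < s := hcmp
      · have : i = (lo + hi) / 2 := by omega
        exact this ▸ hcmp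
    · -- ¬ l[mid] < s : search left half
      refine ih ((lo + hi) / 2 - lo) (by omega) _ _ rfl (by omega) (by omega) hpre ?_
      intro i hge hlen hcontra
      rcases Nat.lt_or_ge i ((lo + hi) / 2) with h' | h'
      · omega
      · rcases Nat.eq_or_lt_of_le h' with h'' | h''
        · exact hcmp (h'' ▸ hcontra)
        · have hmidlen : (lo + hi) / 2 < l.length := by omega
          have hle2 : l[(lo + hi) / 2] ≤ l[i] :=
            List.pairwise_iff_getElem.mp hsort ((lo + hi) / 2) i hmidlen hlen h''
          apply hcmp
          rw [List.getD_eq_getElem l "" hmidlen]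
          rw [List.getD_eq_getElem l "" hlen] at hcontra
          exact lt_of_le_of_lt hle2 hcontra
    · exact ⟨by omega, hpre, fun i hge hlen => hsuf i (by omega) hlen⟩

-- on a sorted list, Source B's bisect + final check is exactly membership
theorem bisect_mem (l : List String) (hsort : l.Pairwise (fun a b => a ≤ b)) (s : String) :
    (decide (pvBisect l s 0 l.length < l.length)
      && (l.getD (pvBisect l s 0 l.length) "" == s)) = l.contains s := by
  obtain ⟨h1, h2, h3⟩ :=
    pvBisect_spec l hsort s l.length 0 l.length rfl (by omega) le_rfl
      (fun i hi => absurd hi (by omega)) (fun i hge hlen => absurd hlen (by omega))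
  rw [Bool.eq_iff_iff]
  simp only [Bool.and_eq_true, decide_eq_true_eq, beq_iff_eq, List.contains_eq_mem]
  constructor
  · rintro ⟨hlt, heq⟩
    rw [List.getD_eq_getElem l "" hlt] at heq
    exact heq ▸ List.getElem_mem hlt
  · intro hmem
    obtain ⟨j, hj, hjeq⟩ := List.getElem_of_mem hmem
    have hjr : pvBisect l s 0 l.length ≤ j := by
      by_contra hc
      have := h2 j (by omega)
      rw [List.getD_eq_getElem l "" hj, hjeq] at this
      exact lt_irrefl s this
    have hrlt : pvBisect l s 0 l.length < l.length := by omega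
    refine ⟨hrlt, ?_⟩
    rw [List.getD_eq_getElem l "" hrlt]
    have hles : l[pvBisect l s 0 l.length] ≤ s := by
      rcases Nat.eq_or_lt_of_le hjr with h' | h'
      · refine le_of_eq ?_
        rw [show l[pvBisect l s 0 l.length] = l[j]'hj from by congr 1]
        exact hjeq
      · exact hjeq ▸ List.pairwise_iff_getElem.mp hsort _ j hrlt hj h'
    have hnlt := h3 (pvBisect l s 0 l.length) le_rfl hrlt
    rw [List.getD_eq_getElem l "" hrlt] at hnlt
    exact le_antisymm hles (not_lt.mp hnlt)

-- ===== VERDICT (by name: the statement is the Claim_ definition above) =====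
theorem isPartOfAllowedWords_spec : Claim_equal_isPartOfAllowedWords := by
  intro s _
  unfold Spec_isPartOfAllowedWords
  rw [Bool.eq_iff_iff, portA_mem]
  rw [isPartOfAllowedWords_alt]
  rw [bisect_mem pvAllowedSorted (PySem.List.sorted_pairwise pvAllWords (fun x => x)) s]
  simp only [List.contains_eq_mem, decide_eq_true_eq, pvAllowedSorted]
  exact (PySem.List.mem_sorted pvAllWords (fun x => x) false s).symm
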